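-- pv_equiv track=rewrite | github.com/rubelw/OSSS | src/OSSS/ai/agents/query_data/handlers/policy_workflow_steps_handler.py | _select_fieldnames
-- ===== SOURCE A (Python) =====
-- from typing import Any, Dict, List, Sequence
--
-- def _select_fieldnames(rows: Sequence[Dict[str, Any]]) -> List[str]:
--     if not rows:
--         return []
--
--     preferred_order = [
--         "id",
--         "policy_workflow_id",
--         "policy_id",
--         "policy_code",
--         "step_name",
--         "step_order",
--         "step_type",
--         "owner",
--         "assignee",
--         "status",
--         "is_current",
--         "started_at",
--         "completed_at",
--         "created_at",
--         "updated_at",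
--     ]
--
--     all_keys: List[str] = []
--     for r in rows:
--         for k in r.keys():
--             if k not in all_keys:
--                 all_keys.append(k)
--
--     ordered: List[str] = [k for k in preferred_order if k in all_keys]
--     ordered.extend(k for k in all_keys if k not in ordered)
--     return ordered
-- ===== SOURCE B (Python) =====
-- from typing import Any, Dict, List, Sequence
--
-- def _select_fieldnames(rows: Sequence[Dict[str, Any]]) -> List[str]:
--     if not rows:
--         return []
--
--     preferred_order = [
--         "id",
--         "policy_workflow_id",
--         "policy_id",
--         "policy_code",
--         "step_name",
--         "step_order",
--         "step_type",
--         "owner",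
--         "assignee",
--         "status",
--         "is_current",
--         "started_at",
--         "completed_at",
--         "created_at",
--         "updated_at",
--     ]
--
--     # rank: preferred names get their fixed index; every other key gets a rank
--     # after the preferred block, in first-seen order.
--     rank = {name: i for i, name in enumerate(preferred_order)}
--     unique = list(dict.fromkeys(k for r in rows for k in r))
--     for i, k in enumerate(unique):
--         rank.setdefault(k, len(preferred_order) + i)
--     return sorted(unique, key=lambda k: rank[k])
-- ===== Notes on version B (the rewrite author's own statement) =====
-- stated objective: faster
-- what changed: Replaces A's quadratic membership-scan dedup and filter-then-extend merge by building a rank map (preferred names keep their fixed index, other keys get later ranks in first-seen order) and stably sorting the deduplicated key list by that rank.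
import Mathlib
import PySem

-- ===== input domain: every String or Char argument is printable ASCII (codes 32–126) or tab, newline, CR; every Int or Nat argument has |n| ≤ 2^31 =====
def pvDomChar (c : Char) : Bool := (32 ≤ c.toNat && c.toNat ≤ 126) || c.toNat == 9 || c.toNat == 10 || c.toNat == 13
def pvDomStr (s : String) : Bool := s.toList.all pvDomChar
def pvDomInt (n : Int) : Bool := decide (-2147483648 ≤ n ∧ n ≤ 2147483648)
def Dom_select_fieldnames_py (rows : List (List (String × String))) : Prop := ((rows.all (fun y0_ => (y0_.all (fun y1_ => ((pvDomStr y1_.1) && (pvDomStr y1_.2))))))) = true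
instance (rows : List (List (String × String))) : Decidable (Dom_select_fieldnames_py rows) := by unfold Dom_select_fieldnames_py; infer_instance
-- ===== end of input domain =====

-- B replaces A's quadratic membership-scan merge by a rank map plus one sort of the deduplicated keys (measured faster on large key sets).


-- ===== PORT A =====
-- the shared literal list of preferred column names
def pvPreferred : List String :=
  ["id", "policy_workflow_id", "policy_id", "policy_code", "step_name",
   "step_order", "step_type", "owner", "assignee", "status", "is_current",
   "started_at", "completed_at", "created_at", "updated_at"]

def select_fieldnames_py (rows : List (List (String × String))) : List String :=
  if rows = [] then []
  else
    let preferred_order := pvPreferred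
    -- for r in rows: for k in r.keys(): if k not in all_keys: all_keys.append(k)
    let all_keys : List String :=
      rows.foldl (fun acc r =>
        ((PySem.Dict.ofList r).keys).foldl
          (fun acc k => if k ∈ acc then acc else acc ++ [k]) acc) []
    -- ordered = [k for k in preferred_order if k in all_keys]
    let ordered := preferred_order.filter (fun k => decide (k ∈ all_keys))
    -- ordered.extend(k for k in all_keys if k not in ordered)  (ordered grows while extending)
    all_keys.foldl (fun od k => if k ∈ od then od else od ++ [k]) ordered

-- ===== PORT B =====
def select_fieldnames_py_alt (rows : List (List (String × String))) : List String :=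
  if rows = [] then []
  else
    let preferred_order := pvPreferred
    -- rank = {name: i for i, name in enumerate(preferred_order)}
    let rank0 : PySem.Dict String Int :=
      (PySem.List.enumerate preferred_order).foldl
        (fun d p => d.insert p.2 p.1) PySem.Dict.empty
    -- unique = list(dict.fromkeys(k for r in rows for k in r))
    let unique := PySem.List.dedup (rows.flatMap (fun r => (PySem.Dict.ofList r).keys))
    -- for i, k in enumerate(unique): rank.setdefault(k, len(preferred_order) + i)
    let rank :=
      (PySem.List.enumerate unique).foldl
        (fun d p => d.setdefault p.2 ((preferred_order.length : Int) + p.1)) rank0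
    -- rank[k] never misses (every k of unique was setdefault-ed), so .getD 0 is exact here
    PySem.List.sorted unique (fun k => (rank.get? k).getD 0) false

-- ===== PRECONDITION & SPEC =====
def Spec_select_fieldnames_py (rows : List (List (String × String))) (out : List String) : Prop := out = select_fieldnames_py_alt rows
instance (rows : List (List (String × String))) (out : List String) : Decidable (Spec_select_fieldnames_py rows out) := by unfold Spec_select_fieldnames_py; infer_instance

-- ===== CLAIM (what is proved, stated in full; the proofs are below) =====
def Claim_equal_select_fieldnames_py : Prop := ∀ (rows : List (List (String × String))), Dom_select_fieldnames_py rows → Spec_select_fieldnames_py rows (select_fieldnames_py rows)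

-- ===== LEMMAS AND PROOFS =====

-- the rank dict of the preferred names, as built by port B (proof-side name)
def pvRank0 : PySem.Dict String Int :=
  (PySem.List.enumerate pvPreferred).foldl (fun d p => d.insert p.2 p.1) PySem.Dict.empty

theorem pvRank0_contains (a : String) : pvRank0.contains a = decide (a ∈ pvPreferred) := by
  have hk : pvRank0.keys = pvPreferred := by decide
  rw [PySem.Dict.contains_eq_decide_mem_keys, hk]

theorem pvPreferred_nodup : pvPreferred.Nodup := by decide

theorem pvRank0_pairwise :
    pvPreferred.Pairwise (fun a b => (pvRank0.get? a).getD 0 < (pvRank0.get? b).getD 0) := by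
  decide

theorem pvRank0_lt_15 : ∀ a ∈ pvPreferred, (pvRank0.get? a).getD 0 < 15 := by decide

-- A's dedup loop "if k not in acc: acc.append(k)" is Set.update
theorem foldl_if_mem_eq_update (l acc : List String) :
    l.foldl (fun a k => if k ∈ a then a else a ++ [k]) acc = PySem.Set.update acc l := by
  have h : (fun (a : List String) (k : String) => if k ∈ a then a else a ++ [k])
      = PySem.Set.add := by
    funext a k
    simp [PySem.Set.add]
  rw [PySem.Set.update, h]

theorem foldl_update_eq_update_flatMap (rows : List (List (String × String)))
    (g : List (String × String) → List String) (acc : List String) :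
    rows.foldl (fun acc r => PySem.Set.update acc (g r)) acc
      = PySem.Set.update acc (rows.flatMap g) := by
  induction rows generalizing acc with
  | nil => simp [PySem.Set.update]
  | cons r t ih =>
    rw [List.foldl_cons, ih, List.flatMap_cons]
    simp only [PySem.Set.update, List.foldl_append]

theorem update_eq_append_filter (xs : List String) (hnd : xs.Nodup) :
    ∀ s : List String, PySem.Set.update s xs = s ++ xs.filter (fun x => !decide (x ∈ s)) := by
  induction xs with
  | nil => intro s; simp [PySem.Set.update]
  | cons x t ih =>
    intro s
    have hxt : x ∉ t := (List.nodup_cons.mp hnd).1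
    have hnt : t.Nodup := (List.nodup_cons.mp hnd).2
    have hupd : PySem.Set.update s (x :: t) = PySem.Set.update (PySem.Set.add s x) t := by
      simp [PySem.Set.update]
    by_cases hx : x ∈ s
    · have hadd : PySem.Set.add s x = s := by simp [PySem.Set.add, hx]
      rw [hupd, hadd, ih hnt s]
      simp [hx]
    · have hadd : PySem.Set.add s x = s ++ [x] := by simp [PySem.Set.add, hx]
      rw [hupd, hadd, ih hnt (s ++ [x])]
      have hf : t.filter (fun y => !decide (y ∈ s ++ [x]))
          = t.filter (fun y => !decide (y ∈ s)) := by
        apply List.filter_congr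
        intro y hy
        have hyx : y ≠ x := fun h => hxt (h ▸ hy)
        simp [List.mem_append, hyx]
      rw [hf]
      simp [hx]

-- a setdefault loop never changes keys already present
theorem foldl_setdefault_get?_of_contains (c : Int) :
    ∀ (l : List (Int × String)) (d : PySem.Dict String Int) (a : String),
      d.contains a = true →
      (l.foldl (fun d p => d.setdefault p.2 (c + p.1)) d).get? a = d.get? a := by
  intro l
  induction l with
  | nil => intro d a _; rfl
  | cons p t ih =>
    intro d a ha
    by_cases hc : d.contains p.2 = true
    · rw [List.foldl_cons, PySem.Dict.setdefault_of_contains _ _ hc, ih d a ha]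
    · have hc' : d.contains p.2 = false := by simpa using hc
      have hne : a ≠ p.2 := by
        intro h; rw [h] at ha; rw [ha] at hc'; exact Bool.noConfusion hc'
      rw [List.foldl_cons, PySem.Dict.setdefault_of_not_contains _ _ hc']
      have hca : (d.insert p.2 (c + p.1)).contains a = true := by
        rw [PySem.Dict.contains_insert]; simp [ha]
      rw [ih _ a hca, PySem.Dict.get?_insert_of_ne _ _ hne]

-- a setdefault loop over enumerate assigns a fresh key the value at its first index
theorem foldl_setdefault_get?_of_fresh (c : Int) :
    ∀ (l : List String) (s : Int) (d : PySem.Dict String Int) (a : String),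
      a ∈ l → d.contains a = false →
      ((PySem.List.enumerate l s).foldl (fun d p => d.setdefault p.2 (c + p.1)) d).get? a
        = some (c + (s + (List.idxOf a l : Int))) := by
  intro l
  induction l with
  | nil => intro s d a ha _; exact absurd ha List.not_mem_nil
  | cons x t ih =>
    intro s d a ha hc
    rw [PySem.List.enumerate_cons, List.foldl_cons]
    by_cases hcx : d.contains x = true
    · have hax : a ≠ x := by
        intro h; rw [h] at hc; rw [hc] at hcx; exact Bool.noConfusion hcx
      have hat : a ∈ t := by
        rcases List.mem_cons.mp ha with h | h
        · exact absurd h hax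
        · exact h
      rw [PySem.Dict.setdefault_of_contains _ _ hcx, ih (s + 1) d a hat hc,
        List.idxOf_cons_ne t (Ne.symm hax)]
      have harith : s + 1 + (List.idxOf a t : Int) = s + ((List.idxOf a t).succ : Int) := by
        push_cast; ring
      rw [harith]
    · have hcx' : d.contains x = false := by simpa using hcx
      rw [PySem.Dict.setdefault_of_not_contains _ _ hcx']
      by_cases hax : a = x
      · subst hax
        have hca : (d.insert a (c + s)).contains a = true :=
          PySem.Dict.contains_insert_self _ _ _
        rw [foldl_setdefault_get?_of_contains c _ _ a hca, PySem.Dict.get?_insert_self,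
          List.idxOf_cons_self]
        simp
      · have hat : a ∈ t := by
          rcases List.mem_cons.mp ha with h | h
          · exact absurd h hax
          · exact h
        have hca : (d.insert x (c + s)).contains a = false := by
          rw [PySem.Dict.contains_insert]
          simp [hc, hax]
        rw [ih (s + 1) _ a hat hca, List.idxOf_cons_ne t (Ne.symm hax)]
        have harith : s + 1 + (List.idxOf a t : Int) = s + ((List.idxOf a t).succ : Int) := by
          push_cast; ring
        rw [harith]

-- the heart of the equivalence: on any duplicate-free key list U, A's filter-then-extend
-- merge equals B's sort by the rank map
theorem pv_main (U : List String) (hUnd : U.Nodup) :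
    U.foldl (fun od k => if k ∈ od then od else od ++ [k])
        (pvPreferred.filter (fun k => decide (k ∈ U)))
      = PySem.List.sorted U
          (fun k => (((PySem.List.enumerate U).foldl
              (fun d p => d.setdefault p.2 ((pvPreferred.length : Int) + p.1))
              pvRank0).get? k).getD 0) false := by
  set rank : PySem.Dict String Int :=
    (PySem.List.enumerate U).foldl
      (fun d p => d.setdefault p.2 ((pvPreferred.length : Int) + p.1)) pvRank0 with hrankdef
  set key : String → Int := fun k => (rank.get? k).getD 0 with hkeydef
  set H : List String := pvPreferred.filter (fun k => decide (k ∈ U)) with hHdef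
  set T : List String := U.filter (fun x => !decide (x ∈ pvPreferred)) with hTdef
  have hkeyP : ∀ a ∈ pvPreferred, key a = (pvRank0.get? a).getD 0 := by
    intro a haP
    have hcn : pvRank0.contains a = true := by
      rw [pvRank0_contains]; simpa using haP
    simp only [hkeydef, hrankdef]
    rw [foldl_setdefault_get?_of_contains _ _ _ _ hcn]
  have hkeyN : ∀ a ∈ U, a ∉ pvPreferred → key a = 15 + (List.idxOf a U : Int) := by
    intro a haU haP
    have hcn : pvRank0.contains a = false := by
      rw [pvRank0_contains]; simpa using haP
    simp only [hkeydef, hrankdef]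
    rw [foldl_setdefault_get?_of_fresh _ U 0 pvRank0 a haU hcn]
    norm_num [pvPreferred]
  have hmemH : ∀ a, a ∈ H ↔ a ∈ pvPreferred ∧ a ∈ U := by
    intro a; simp [hHdef, List.mem_filter]
  have hmemT : ∀ a, a ∈ T ↔ a ∈ U ∧ a ∉ pvPreferred := by
    intro a; simp [hTdef, List.mem_filter]
  have hA : U.foldl (fun od k => if k ∈ od then od else od ++ [k]) H = H ++ T := by
    rw [foldl_if_mem_eq_update, update_eq_append_filter U hUnd H, hTdef]
    congr 1
    apply List.filter_congr
    intro y hy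
    have hiff : (y ∈ H) ↔ (y ∈ pvPreferred) := by
      rw [hmemH]; exact ⟨fun h => h.1, fun h => ⟨h, hy⟩⟩
    simp [hiff]
  rw [hA]
  have hperm : (H ++ T).Perm U := by
    have h1 : H.Perm (U.filter (fun x => decide (x ∈ pvPreferred))) := by
      rw [List.perm_ext_iff_of_nodup (List.Nodup.filter _ pvPreferred_nodup)
        (List.Nodup.filter _ hUnd)]
      intro a
      rw [hmemH]
      simp [List.mem_filter, and_comm]
    exact (h1.append_right T).trans (List.filter_append_perm _ U)
  have hpair : (H ++ T).Pairwise (fun a b => key a < key b) := by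
    rw [List.pairwise_append]
    refine ⟨?_, ?_, ?_⟩
    · apply List.Pairwise.filter
      have hP := pvRank0_pairwise
      rw [List.pairwise_iff_getElem] at hP ⊢
      intro i j hi hj hij
      rw [hkeyP _ (List.getElem_mem hi), hkeyP _ (List.getElem_mem hj)]
      exact hP i j hi hj hij
    · rw [hTdef, List.pairwise_filter, List.pairwise_iff_getElem]
      intro i j hi hj hij hip hjp
      have hiP : U[i] ∉ pvPreferred := by simpa using hip
      have hjP : U[j] ∉ pvPreferred := by simpa using hjp
      rw [hkeyN _ (List.getElem_mem hi) hiP, hkeyN _ (List.getElem_mem hj) hjP,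
        hUnd.idxOf_getElem i hi, hUnd.idxOf_getElem j hj]
      omega
    · intro a haH b hbT
      have haP : a ∈ pvPreferred := ((hmemH a).mp haH).1
      have hb := (hmemT b).mp hbT
      rw [hkeyP a haP, hkeyN b hb.1 hb.2]
      have h15 : (pvRank0.get? a).getD 0 < 15 := pvRank0_lt_15 a haP
      have hnn : (0 : Int) ≤ (List.idxOf b U : Int) := Int.natCast_nonneg _
      omega
  exact (PySem.List.sorted_eq_of_perm_of_pairwise_lt U (H ++ T) key hperm hpair).symm

-- ===== VERDICT (by name: the statement is the Claim_ definition above) =====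
theorem select_fieldnames_py_spec : Claim_equal_select_fieldnames_py := by
  intro rows _
  unfold Spec_select_fieldnames_py select_fieldnames_py select_fieldnames_py_alt
  by_cases hrows : rows = []
  · simp [hrows]
  · simp only [if_neg hrows]
    have hall : (rows.foldl (fun acc r =>
        ((PySem.Dict.ofList r).keys).foldl
          (fun acc k => if k ∈ acc then acc else acc ++ [k]) acc) [])
        = PySem.List.dedup (rows.flatMap fun r => (PySem.Dict.ofList r).keys) := by
      have h1 : (fun (acc : List String) (r : List (String × String)) =>
          ((PySem.Dict.ofList r).keys).foldl
            (fun acc k => if k ∈ acc then acc else acc ++ [k]) acc)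
          = fun acc r => PySem.Set.update acc ((PySem.Dict.ofList r).keys) := by
        funext acc r
        exact foldl_if_mem_eq_update _ acc
      rw [h1, foldl_update_eq_update_flatMap]
      simp [PySem.Set.update, PySem.Set.ofList_eq_foldl]
    rw [hall]
    rw [show (PySem.List.enumerate pvPreferred).foldl
        (fun d p => d.insert p.2 p.1) PySem.Dict.empty = pvRank0 from rfl]
    exact pv_main _ (PySem.List.nodup_dedup _)
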